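-- pv_equiv track=rewrite | github.com/CodeWithMrunal/ScrapersHub | GoogleSheetsExtractorWeTransfer/google_sheets_extractor.py | split_cell_links
-- ===== SOURCE A (Python) =====
-- def split_cell_links(cell_value):
--     """Split cell value by various delimiters to extract individual links"""
--     if not cell_value:
--         return []
--
--     # Split by common delimiters
--     delimiters = ['\n', '\r\n', '\r', '|', ';', ',']
--     links = [cell_value]
--
--     for delimiter in delimiters:
--         new_links = []
--         for link in links:
--             new_links.extend([l.strip() for l in link.split(delimiter) if l.strip()])
--         links = new_links
--
--     # Filter out empty strings and ensure we have valid URLs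
--     valid_links = []
--     for link in links:
--         link = link.strip()
--         if link and ('http://' in link or 'https://' in link):
--             valid_links.append(link)
--
--     return valid_links
-- ===== SOURCE B (Python) =====
-- def _flush_link(token, links):
--     piece = ''.join(token).strip()
--     if piece and ('http://' in piece or 'https://' in piece):
--         links.append(piece)
--
--
-- def split_cell_links(cell_value):
--     """Split cell value by various delimiters to extract individual links"""
--     if not cell_value:
--         return []
--
--     links = []
--     token = []
--     for ch in cell_value:
--         if ch in '\n\r|;,':
--             _flush_link(token, links)
--             token = []
--         else:
--             token.append(ch)
--     _flush_link(token, links)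
--     return links
-- ===== Notes on version B (the rewrite author's own statement) =====
-- stated objective: simpler
-- what changed: A runs six sequential split-strip-filter passes (one per delimiter, each rebuilding the whole list) followed by a final URL-filter pass; B makes a single left-to-right scan over the characters with a token accumulator, flushing each stripped token at any delimiter character and keeping it only if it contains a URL marker.
import Mathlib
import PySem

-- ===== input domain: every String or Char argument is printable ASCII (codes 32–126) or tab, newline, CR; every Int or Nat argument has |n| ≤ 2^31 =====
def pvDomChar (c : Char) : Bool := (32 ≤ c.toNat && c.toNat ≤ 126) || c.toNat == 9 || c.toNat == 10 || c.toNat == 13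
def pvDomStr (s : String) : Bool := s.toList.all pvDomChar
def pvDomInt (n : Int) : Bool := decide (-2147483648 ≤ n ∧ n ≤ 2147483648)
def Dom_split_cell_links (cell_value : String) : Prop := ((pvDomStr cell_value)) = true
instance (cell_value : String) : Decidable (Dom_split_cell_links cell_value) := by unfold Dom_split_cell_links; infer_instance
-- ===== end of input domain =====

-- B replaces A's six sequential split-strip-filter passes by ONE left-to-right scan with a token
-- accumulator, flushing a stripped token at every delimiter character (objective: simpler, one pass).

-- ===== PORT A =====
-- literal transliteration of A: six-delimiter pipeline, then the URL filter loop.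
-- ['h','t','t','p',':','/','/'] is "http://".toList, written as a char list for transparency.
def split_cell_links (cell_value : String) : List String :=
  if cell_value = "" then []
  else
    let delimiters : List (List Char) := [['\n'], ['\r', '\n'], ['\r'], ['|'], [';'], [',']]
    let links :=
      delimiters.foldl (fun links delimiter =>
        links.foldl (fun new_links link =>
          new_links ++
            ((PySem.Chars.splitOn link delimiter).filter
                (fun l => !(PySem.Chars.strip l).isEmpty)).map PySem.Chars.strip) [])
        [cell_value.toList]
    let valid_links :=
      links.foldl (fun valid_links link =>
        let l := PySem.Chars.strip link
        if !l.isEmpty &&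
            (PySem.Chars.isIn ['h','t','t','p',':','/','/'] l ||
             PySem.Chars.isIn ['h','t','t','p','s',':','/','/'] l)
        then valid_links ++ [l] else valid_links) []
    valid_links.map String.ofList

-- ===== PORT B =====
-- transliteration of Source B: _flush_link, then the single character scan.
def pvFlushLink (token : List Char) (links : List (List Char)) : List (List Char) :=
  let piece := PySem.Chars.strip token
  if !piece.isEmpty &&
      (PySem.Chars.isIn ['h','t','t','p',':','/','/'] piece ||
       PySem.Chars.isIn ['h','t','t','p','s',':','/','/'] piece)
  then links ++ [piece] else links

-- `ch in '\n\r|;,'` on a single character is membership in those five characters (exact).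
def pvScanLinks : List Char → List Char → List (List Char) → List (List Char)
  | [], token, links => pvFlushLink token links
  | ch :: rest, token, links =>
      if ch == '\n' || (ch == '\r' || (ch == '|' || (ch == ';' || ch == ','))) then
        pvScanLinks rest [] (pvFlushLink token links)
      else pvScanLinks rest (token ++ [ch]) links

def split_cell_links_alt (cell_value : String) : List String :=
  if cell_value = "" then []
  else (pvScanLinks cell_value.toList [] []).map String.ofList

-- ===== PRECONDITION & SPEC =====
def Spec_split_cell_links (cell_value : String) (out : List String) : Prop := out = split_cell_links_alt cell_value
instance (cell_value : String) (out : List String) : Decidable (Spec_split_cell_links cell_value out) := by unfold Spec_split_cell_links; infer_instance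

-- ===== CLAIM (what is proved, stated in full; the proofs are below) =====
def Claim_equal_split_cell_links : Prop := ∀ (cell_value : String), Dom_split_cell_links cell_value → Spec_split_cell_links cell_value (split_cell_links cell_value)

-- ===== LEMMAS AND PROOFS =====

-- canonical splitter on a character predicate, keeping empty pieces (proof-side only)
def pvConsHead (c : Char) : List (List Char) → List (List Char)
  | [] => [[c]]
  | t :: r => (c :: t) :: r

def pvSp (p : Char → Bool) : List Char → List (List Char)
  | [] => [[]]
  | c :: cs => if p c then [] :: pvSp p cs else pvConsHead c (pvSp p cs)

def pvMapHead (f : List Char → List Char) : List (List Char) → List (List Char)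
  | [] => []
  | t :: r => f t :: r

def pvSnocLast (c : Char) : List (List Char) → List (List Char)
  | [] => [[c]]
  | [t] => [t ++ [c]]
  | t :: r => t :: pvSnocLast c r

def pvKeep (piece : List Char) : Bool :=
  !piece.isEmpty &&
    (PySem.Chars.isIn ['h','t','t','p',':','/','/'] piece ||
     PySem.Chars.isIn ['h','t','t','p','s',':','/','/'] piece)

-- the stripped nonempty tokens of a split
def pvTok (p : Char → Bool) (l : List Char) : List (List Char) :=
  ((pvSp p l).map PySem.Chars.strip).filter (fun x => !x.isEmpty)

def pvP (c : Char) : Bool := c == '\n' || (c == '\r' || (c == '|' || (c == ';' || c == ',')))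

lemma pvSp_ne_nil (p : Char → Bool) (l : List Char) : pvSp p l ≠ [] := by
  cases l with
  | nil => simp [pvSp]
  | cons c cs =>
    simp only [pvSp]
    split
    · simp
    · cases h : pvSp p cs <;> simp [pvConsHead]

lemma pvConsHead_append (c : Char) (a b : List (List Char)) (ha : a ≠ []) :
    pvConsHead c (a ++ b) = pvConsHead c a ++ b := by
  cases a with
  | nil => exact absurd rfl ha
  | cons t r => simp [pvConsHead]

lemma pvMapHead_nil_append (ps : List (List Char)) :
    pvMapHead (fun t => [] ++ t) ps = ps := by
  cases ps <;> simp [pvMapHead]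

-- ----- strip facts -----
lemma pvStrip_nil : PySem.Chars.strip ([] : List Char) = [] := rfl

lemma pvRstrip_snoc (x : List Char) (c : Char) (hc : PySem.Chars.isspace c = true) :
    PySem.Chars.rstrip (x ++ [c]) = PySem.Chars.rstrip x := by
  simp [PySem.Chars.rstrip, hc]

lemma pvStrip_cons_space (c : Char) (t : List Char) (hc : PySem.Chars.isspace c = true) :
    PySem.Chars.strip (c :: t) = PySem.Chars.strip t := by
  simp [PySem.Chars.strip, PySem.Chars.lstrip, hc]

lemma pvStrip_snoc_space (t : List Char) (c : Char) (hc : PySem.Chars.isspace c = true) :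
    PySem.Chars.strip (t ++ [c]) = PySem.Chars.strip t := by
  simp only [PySem.Chars.strip, PySem.Chars.lstrip, List.dropWhile_append]
  split
  · rename_i h
    simp [hc, List.isEmpty_iff.mp h]
  · exact pvRstrip_snoc _ c hc

lemma pvStrip_idem (l : List Char) :
    PySem.Chars.strip (PySem.Chars.strip l) = PySem.Chars.strip l := by
  have hA : ∀ y : List Char, List.dropWhile PySem.Chars.isspace y = y →
      PySem.Chars.lstrip (PySem.Chars.rstrip y) = PySem.Chars.rstrip y := by
    intro y hy
    cases y with
    | nil => rfl
    | cons c t =>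
      have hc : PySem.Chars.isspace c = false := by
        by_cases h : PySem.Chars.isspace c = true
        · exfalso
          have := List.length_dropWhile_le PySem.Chars.isspace t
          rw [List.dropWhile_cons, if_pos h] at hy
          have : (List.dropWhile PySem.Chars.isspace t).length = t.length + 1 := by rw [hy]; rfl
          omega
        · simpa using h
      simp only [PySem.Chars.rstrip, PySem.Chars.lstrip, List.reverse_cons, List.dropWhile_append]
      split
      · simp [hc]
      · simp [hc]
  have hy0 : List.dropWhile PySem.Chars.isspace (PySem.Chars.lstrip l) = PySem.Chars.lstrip l :=
    List.dropWhile_idempotent _ _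
  show PySem.Chars.rstrip (PySem.Chars.lstrip (PySem.Chars.rstrip (PySem.Chars.lstrip l))) = _
  rw [hA _ hy0]
  show (List.dropWhile _ (List.dropWhile _ (PySem.Chars.lstrip l).reverse).reverse.reverse).reverse = _
  rw [List.reverse_reverse, List.dropWhile_idempotent]
  rfl

lemma pvStrip_subset (l : List Char) : PySem.Chars.strip l ⊆ l := by
  intro c hc
  have hc1 : c ∈ PySem.Chars.lstrip l := by
    have : c ∈ List.dropWhile PySem.Chars.isspace (PySem.Chars.lstrip l).reverse := by
      simpa [PySem.Chars.strip, PySem.Chars.rstrip, List.mem_reverse] using hc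
    have := (List.dropWhile_suffix (l := (PySem.Chars.lstrip l).reverse) PySem.Chars.isspace).subset this
    simpa [List.mem_reverse] using this
  exact (List.dropWhile_suffix (l := l) PySem.Chars.isspace).subset hc1

-- ----- the two splitOn characterizations -----
lemma pvGo1 (d : Char) : ∀ (fuel : Nat) (l : List Char), l.length ≤ fuel →
    ∀ (cur : List Char) (acc : List (List Char)),
    PySem.Chars.splitOn.go [d] fuel l cur acc =
      acc.reverse ++ pvMapHead (fun t => cur.reverse ++ t) (pvSp (fun c => c == d) l) := by
  intro fuel
  induction fuel with
  | zero =>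
    intro l hl cur acc
    have : l = [] := List.length_eq_zero_iff.mp (Nat.le_zero.mp hl)
    subst this
    simp [PySem.Chars.splitOn.go, pvSp, pvMapHead]
  | succ f ih =>
    intro l hl cur acc
    cases l with
    | nil => simp [PySem.Chars.splitOn.go, pvSp, pvMapHead]
    | cons c rest =>
      rw [PySem.Chars.splitOn.go]
      by_cases hc : c = d
      · subst hc
        have hpre : [c].isPrefixOf (c :: rest) = true := by simp [List.isPrefixOf]
        rw [if_pos hpre]
        simp only [List.length_cons] at hl
        rw [ih _ (by simpa using Nat.le_of_succ_le_succ hl)]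
        cases hs : pvSp (fun c_1 => c_1 == c) rest with
        | nil => exact absurd hs (pvSp_ne_nil _ _)
        | cons t r => simp [pvSp, hs, pvMapHead]
      · have hpre : [d].isPrefixOf (c :: rest) = false := by
          simp [List.isPrefixOf]
          exact fun h => absurd h.symm hc
        rw [if_neg (by simp [hpre])]
        simp only [List.length_cons] at hl
        rw [ih _ (Nat.le_of_succ_le_succ hl)]
        cases hs : pvSp (fun c_1 => c_1 == d) rest with
        | nil => exact absurd hs (pvSp_ne_nil _ _)
        | cons t r => simp [pvSp, hc, hs, pvConsHead, pvMapHead]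

lemma pvSplitOn_singleton (d : Char) (l : List Char) :
    PySem.Chars.splitOn l [d] = pvSp (fun c => c == d) l := by
  rw [PySem.Chars.splitOn, pvGo1 d _ l (Nat.le_succ _) [] []]
  cases h : pvSp (fun c => c == d) l with
  | nil => exact absurd h (pvSp_ne_nil _ _)
  | cons t r => simp [pvMapHead]

lemma pvGo2 (sep : List Char) : ∀ (fuel : Nat) (l : List Char), l.length ≤ fuel →
    ¬ sep <:+: l → ∀ (cur : List Char) (acc : List (List Char)),
    PySem.Chars.splitOn.go sep fuel l cur acc = acc.reverse ++ [cur.reverse ++ l] := by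
  intro fuel
  induction fuel with
  | zero =>
    intro l hl hinf cur acc
    have : l = [] := List.length_eq_zero_iff.mp (Nat.le_zero.mp hl)
    subst this
    simp [PySem.Chars.splitOn.go]
  | succ f ih =>
    intro l hl hinf cur acc
    cases l with
    | nil => simp [PySem.Chars.splitOn.go]
    | cons c rest =>
      rw [PySem.Chars.splitOn.go]
      have hpre : sep.isPrefixOf (c :: rest) = false := by
        by_cases h : sep.isPrefixOf (c :: rest) = true
        · exact absurd (List.isPrefixOf_iff_prefix.mp h).isInfix hinf
        · exact eq_false_of_ne_true h
      rw [if_neg (by simp [hpre])]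
      have hinf' : ¬ sep <:+: rest := fun h => hinf (h.trans (List.suffix_cons c rest).isInfix)
      simp only [List.length_cons] at hl
      rw [ih rest (Nat.le_of_succ_le_succ hl) hinf']
      simp

lemma pvSplitOn_not_infix (sep l : List Char) (h : ¬ sep <:+: l) :
    PySem.Chars.splitOn l sep = [l] := by
  rw [PySem.Chars.splitOn, pvGo2 sep _ l (Nat.le_succ _) h [] []]
  simp

-- ----- strip is absorbed by tokenisation -----
lemma pvTok_cons_space (p : Char → Bool) (c : Char) (m : List Char)
    (hc : PySem.Chars.isspace c = true) : pvTok p (c :: m) = pvTok p m := by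
  simp only [pvTok, pvSp]
  split
  · simp [pvStrip_nil]
  · cases hs : pvSp p m with
    | nil => exact absurd hs (pvSp_ne_nil _ _)
    | cons t r => simp [pvConsHead, pvStrip_cons_space c t hc]

lemma pvMapStrip_snocLast (c : Char) (hc : PySem.Chars.isspace c = true) :
    ∀ (ps : List (List Char)), ps ≠ [] →
      (pvSnocLast c ps).map PySem.Chars.strip = ps.map PySem.Chars.strip
  | [], h => absurd rfl h
  | [t], _ => by simp [pvSnocLast, pvStrip_snoc_space t c hc]
  | t :: t2 :: r, _ => by
      have := pvMapStrip_snocLast c hc (t2 :: r) (by simp)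
      simp only [pvSnocLast, List.map_cons] at this ⊢
      rw [this]

lemma pvSp_snoc (p : Char → Bool) (c : Char) : ∀ (x : List Char),
    pvSp p (x ++ [c]) = if p c then pvSp p x ++ [[]] else pvSnocLast c (pvSp p x)
  | [] => by
      simp only [List.nil_append, pvSp, pvSnocLast, pvConsHead]
      split <;> rfl
  | a :: x => by
      have ih := pvSp_snoc p c x
      simp only [List.cons_append, pvSp, ih]
      by_cases hc : p c = true
      · simp only [hc, if_true]
        by_cases ha : p a = true
        · simp [ha]
        · simp only [ha, Bool.false_eq_true, if_false]
          exact pvConsHead_append a (pvSp p x) [[]] (pvSp_ne_nil p x)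
      · simp only [hc, Bool.false_eq_true, if_false]
        by_cases ha : p a = true
        · simp only [ha, if_true]
          cases hs : pvSp p x with
          | nil => exact absurd hs (pvSp_ne_nil _ _)
          | cons t r => simp [pvSnocLast]
        · simp only [ha, Bool.false_eq_true, if_false]
          cases hs : pvSp p x with
          | nil => exact absurd hs (pvSp_ne_nil _ _)
          | cons t r =>
            cases r with
            | nil => simp [pvConsHead, pvSnocLast]
            | cons t2 r2 => simp [pvConsHead, pvSnocLast]

lemma pvTok_snoc_space (p : Char → Bool) (c : Char) (m : List Char)
    (hc : PySem.Chars.isspace c = true) : pvTok p (m ++ [c]) = pvTok p m := by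
  simp only [pvTok, pvSp_snoc]
  split
  · simp [pvStrip_nil]
  · rw [pvMapStrip_snocLast c hc _ (pvSp_ne_nil p m)]

lemma pvTok_space_left (p : Char → Bool) : ∀ (w : List Char),
    (∀ a ∈ w, PySem.Chars.isspace a = true) → ∀ (m : List Char), pvTok p (w ++ m) = pvTok p m
  | [], _, m => by simp
  | a :: w, hw, m => by
      rw [List.cons_append, pvTok_cons_space p a _ (hw a (by simp)),
        pvTok_space_left p w (fun x hx => hw x (by simp [hx])) m]

lemma pvTok_space_right (p : Char → Bool) (w : List Char)
    (hw : ∀ a ∈ w, PySem.Chars.isspace a = true) (m : List Char) :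
    pvTok p (m ++ w) = pvTok p m := by
  induction w using List.reverseRecOn generalizing m with
  | nil => simp
  | append_singleton w' a ih =>
    rw [← List.append_assoc, pvTok_snoc_space p a _ (hw a (by simp)),
      ih (fun x hx => hw x (by simp [hx])) m]

lemma pvTok_strip (p : Char → Bool) (l : List Char) :
    pvTok p (PySem.Chars.strip l) = pvTok p l := by
  have h1 : pvTok p (PySem.Chars.lstrip l) = pvTok p l := by
    conv_rhs => rw [← List.takeWhile_append_dropWhile (p := PySem.Chars.isspace) (l := l)]
    exact (pvTok_space_left p _ (fun a ha => List.mem_takeWhile_imp ha) _).symm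
  have h2 : pvTok p (PySem.Chars.rstrip (PySem.Chars.lstrip l)) = pvTok p (PySem.Chars.lstrip l) := by
    set y := PySem.Chars.lstrip l with hy
    have hdecomp : y = PySem.Chars.rstrip y ++ (List.takeWhile PySem.Chars.isspace y.reverse).reverse := by
      conv_lhs => rw [← List.reverse_reverse y,
        ← List.takeWhile_append_dropWhile (p := PySem.Chars.isspace) (l := y.reverse)]
      rw [List.reverse_append]
      rfl
    conv_rhs => rw [hdecomp]
    exact (pvTok_space_right p _ (fun a ha => List.mem_takeWhile_imp (List.mem_reverse.mp ha)) _).symm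
  show pvTok p (PySem.Chars.rstrip (PySem.Chars.lstrip l)) = _
  rw [h2, h1]

-- ----- splitting by (p or d) is splitting by p then by d -----
lemma pvSp_or (p : Char → Bool) (d : Char) : ∀ (cs : List Char),
    pvSp (fun c => p c || c == d) cs = (pvSp p cs).flatMap (pvSp (fun c => c == d))
  | [] => by simp [pvSp]
  | c :: cs => by
      have ih := pvSp_or p d cs
      by_cases hp : p c = true
      · simp only [pvSp, hp, Bool.true_or, if_true, ih]
        simp [pvSp]
      · by_cases hd : (c == d) = true
        · simp only [pvSp, hp, hd, Bool.false_or, if_true, Bool.false_eq_true, if_false, ih]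
          cases hs : pvSp p cs with
          | nil => exact absurd hs (pvSp_ne_nil _ _)
          | cons t r => simp [pvConsHead, pvSp, hd]
        · simp only [pvSp, hp, hd, Bool.or_self, Bool.false_eq_true, if_false, ih]
          cases hs : pvSp p cs with
          | nil => exact absurd hs (pvSp_ne_nil _ _)
          | cons t r =>
            simp only [List.flatMap_cons, pvConsHead]
            cases ht : pvSp (fun c => c == d) t with
            | nil => exact absurd ht (pvSp_ne_nil _ _)
            | cons u s =>
              have hct : pvSp (fun c_1 => c_1 == d) (c :: t) = (c :: u) :: s := by
                simp [pvSp, hd, ht, pvConsHead]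
              rw [hs] at ih
              simp [hct]

-- ----- membership facts about tokens -----
lemma pvTok_mem (p : Char → Bool) (cs piece : List Char) (h : piece ∈ pvTok p cs) :
    PySem.Chars.strip piece = piece ∧ piece.isEmpty = false := by
  simp only [pvTok, List.mem_filter, List.mem_map] at h
  obtain ⟨⟨t, _, rfl⟩, hne⟩ := h
  exact ⟨pvStrip_idem t, by simpa using hne⟩

lemma pvSp_mem_not_delim (p : Char → Bool) : ∀ (cs t : List Char), t ∈ pvSp p cs →
    ∀ c ∈ t, p c = false
  | [], t, ht => by
      simp [pvSp] at ht
      subst ht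
      simp
  | a :: cs, t, ht => by
      by_cases ha : p a = true
      · simp only [pvSp, ha, if_true, List.mem_cons] at ht
        rcases ht with rfl | ht
        · simp
        · exact pvSp_mem_not_delim p cs t ht
      · simp only [pvSp, ha, Bool.false_eq_true, if_false] at ht
        cases hs : pvSp p cs with
        | nil => exact absurd hs (pvSp_ne_nil _ _)
        | cons u r =>
          rw [hs] at ht
          simp only [pvConsHead, List.mem_cons] at ht
          rcases ht with rfl | ht
          · intro c hc
            rcases List.mem_cons.mp hc with rfl | hc
            · exact eq_false_of_ne_true ha
            · exact pvSp_mem_not_delim p cs u (hs ▸ List.mem_cons_self) c hc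
          · exact pvSp_mem_not_delim p cs t (hs ▸ List.mem_cons_of_mem u ht)

lemma pvTok_mem_not_delim (p : Char → Bool) (cs piece : List Char) (h : piece ∈ pvTok p cs) :
    ∀ c ∈ piece, p c = false := by
  simp only [pvTok, List.mem_filter, List.mem_map] at h
  obtain ⟨⟨t, ht, rfl⟩, _⟩ := h
  exact fun c hc => pvSp_mem_not_delim p cs t ht c (pvStrip_subset t hc)

-- filter-then-map of A's list comprehension, rewritten map-then-filter
lemma pvFilterMap (xs : List (List Char)) :
    ((xs.filter (fun l => !(PySem.Chars.strip l).isEmpty)).map PySem.Chars.strip)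
      = (xs.map PySem.Chars.strip).filter (fun x => !x.isEmpty) := by
  induction xs with
  | nil => rfl
  | cons t r ih =>
    by_cases h : (PySem.Chars.strip t).isEmpty = true <;>
      simp [h, ih]

-- ----- one A-stage, described on tokens -----
lemma pvFlatMapTok (d : Char) : ∀ (ps : List (List Char)),
    (((ps.map PySem.Chars.strip).filter (fun x => !x.isEmpty)).flatMap (pvTok (fun c => c == d)))
      = ps.flatMap (pvTok (fun c => c == d))
  | [] => rfl
  | t :: r => by
      have ih := pvFlatMapTok d r
      by_cases h : (PySem.Chars.strip t).isEmpty = true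
      · have ht : PySem.Chars.strip t = [] := List.isEmpty_iff.mp h
        have hz : pvTok (fun c => c == d) t = [] := by
          rw [← pvTok_strip _ t, ht]
          rfl
        simp [h, ih, hz]
      · simp [h, ih, pvTok_strip (fun c => c == d) t]

lemma pvStage_step (p : Char → Bool) (d : Char) (cs : List Char) :
    ((pvTok p cs).flatMap (fun piece =>
        ((PySem.Chars.splitOn piece [d]).filter
            (fun l => !(PySem.Chars.strip l).isEmpty)).map PySem.Chars.strip))
      = pvTok (fun c => p c || c == d) cs := by
  have hfun : ∀ piece : List Char,
      ((PySem.Chars.splitOn piece [d]).filter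
          (fun l => !(PySem.Chars.strip l).isEmpty)).map PySem.Chars.strip
        = pvTok (fun c => c == d) piece := by
    intro piece
    rw [pvSplitOn_singleton, pvFilterMap]
    rfl
  calc ((pvTok p cs).flatMap (fun piece =>
        ((PySem.Chars.splitOn piece [d]).filter
            (fun l => !(PySem.Chars.strip l).isEmpty)).map PySem.Chars.strip))
      = (pvTok p cs).flatMap (pvTok (fun c => c == d)) := by
        exact List.flatMap_congr (fun piece _ => hfun piece)
    _ = (pvSp p cs).flatMap (pvTok (fun c => c == d)) := by
        have := pvFlatMapTok d (pvSp p cs)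
        simpa [pvTok] using this
    _ = pvTok (fun c => p c || c == d) cs := by
        simp only [pvTok, pvSp_or p d cs]
        rw [List.map_flatMap, List.filter_flatMap]
        rfl

lemma pvFlatMap_id (f : List Char → List (List Char)) :
    ∀ (l : List (List Char)), (∀ x ∈ l, f x = [x]) → l.flatMap f = l
  | [], _ => rfl
  | x :: r, h => by
      rw [List.flatMap_cons, h x (by simp), pvFlatMap_id f r (fun y hy => h y (by simp [hy]))]
      rfl

lemma pvStage_rn_id (p : Char → Bool) (hp : p '\n' = true) (cs : List Char) :
    ((pvTok p cs).flatMap (fun piece =>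
        ((PySem.Chars.splitOn piece ['\r', '\n']).filter
            (fun l => !(PySem.Chars.strip l).isEmpty)).map PySem.Chars.strip))
      = pvTok p cs := by
  apply pvFlatMap_id
  intro piece hmem
  obtain ⟨hstr, hne⟩ := pvTok_mem p cs piece hmem
  have hnl : '\n' ∉ piece := by
    intro hc
    have := pvTok_mem_not_delim p cs piece hmem '\n' hc
    rw [hp] at this
    simp at this
  have hinf : ¬ ['\r', '\n'] <:+: piece := fun h => hnl (h.subset (by simp))
  rw [pvSplitOn_not_infix _ _ hinf]
  simp [hstr, hne]

lemma pvTok_congr (p q : Char → Bool) (h : ∀ c, p c = q c) (l : List Char) :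
    pvTok p l = pvTok q l := by
  have : p = q := funext h
  rw [this]

-- ----- B's scan, described on tokens -----
lemma pvFlushLink_eq (token : List Char) (links : List (List Char)) :
    pvFlushLink token links =
      if pvKeep (PySem.Chars.strip token) = true
      then links ++ [PySem.Chars.strip token] else links := rfl

lemma pvScan_eq : ∀ (cs token : List Char) (links : List (List Char)),
    pvScanLinks cs token links =
      links ++ ((pvMapHead (fun t => token ++ t) (pvSp pvP cs)).map PySem.Chars.strip).filter pvKeep
  | [], token, links => by
      show pvFlushLink token links = _
      rw [pvFlushLink_eq]
      simp only [pvSp, pvMapHead, List.append_nil, List.map_cons, List.map_nil,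
        List.filter_cons, List.filter_nil]
      split <;> simp
  | ch :: cs, token, links => by
      show (if pvP ch = true then pvScanLinks cs [] (pvFlushLink token links)
            else pvScanLinks cs (token ++ [ch]) links) = _
      by_cases hch : pvP ch = true
      · rw [if_pos hch, pvScan_eq cs [] (pvFlushLink token links), pvFlushLink_eq,
          pvMapHead_nil_append]
        simp only [pvSp, hch, if_true, pvMapHead, List.map_cons, List.filter_cons]
        cases hs : pvSp pvP cs with
        | nil => exact absurd hs (pvSp_ne_nil _ _)
        | cons t r =>
          simp only [List.map_cons, List.filter_cons, List.append_nil]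
          split <;> simp
      · rw [if_neg hch, pvScan_eq cs (token ++ [ch]) links]
        simp only [pvSp, hch, Bool.false_eq_true, if_false]
        cases hs : pvSp pvP cs with
        | nil => exact absurd hs (pvSp_ne_nil _ _)
        | cons t r => simp [pvConsHead, pvMapHead]

-- A's final URL loop on already-stripped tokens
lemma pvValid (toks : List (List Char)) (htoks : ∀ x ∈ toks, PySem.Chars.strip x = x) :
    ∀ acc, toks.foldl (fun valid_links link =>
        let l := PySem.Chars.strip link
        if !l.isEmpty &&
            (PySem.Chars.isIn ['h','t','t','p',':','/','/'] l ||
             PySem.Chars.isIn ['h','t','t','p','s',':','/','/'] l)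
        then valid_links ++ [l] else valid_links) acc = acc ++ toks.filter pvKeep := by
  induction toks with
  | nil => intro acc; simp
  | cons t r ih =>
    intro acc
    have ht : PySem.Chars.strip t = t := htoks t (by simp)
    rw [List.foldl_cons]
    show List.foldl _ (if pvKeep (PySem.Chars.strip t) = true then acc ++ [PySem.Chars.strip t] else acc) r = _
    rw [ht, ih (fun x hx => htoks x (by simp [hx])), List.filter_cons]
    split <;> simp

-- the empty-token filter in pvTok is subsumed by pvKeep
lemma pvFilterKeep (xs : List (List Char)) :
    (xs.filter (fun x => !x.isEmpty)).filter pvKeep = xs.filter pvKeep := by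
  rw [List.filter_filter]
  apply List.filter_congr
  intro a _
  unfold pvKeep
  cases a.isEmpty <;> simp

-- ===== VERDICT (by name: the statement is the Claim_ definition above) =====
theorem split_cell_links_spec : Claim_equal_split_cell_links := by
  intro cell_value _
  unfold Spec_split_cell_links split_cell_links split_cell_links_alt
  by_cases h : cell_value = ""
  · simp [h]
  · rw [if_neg h, if_neg h]
    -- reduce A's six stages to tokens of the combined predicate
    simp only [List.foldl_cons, List.foldl_nil, PySem.List.foldl_append_eq_flatMap,
      List.nil_append, List.flatMap_singleton]
    have e1 : ((PySem.Chars.splitOn cell_value.toList ['\n']).filter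
        (fun l => !(PySem.Chars.strip l).isEmpty)).map PySem.Chars.strip
        = pvTok (fun c => c == '\n') cell_value.toList := by
      rw [pvSplitOn_singleton, pvFilterMap]
      rfl
    rw [e1, pvStage_rn_id _ (by rfl) cell_value.toList, pvStage_step, pvStage_step,
      pvStage_step, pvStage_step]
    -- A's final loop is a filter over the tokens
    rw [pvValid _ (fun x hx => (pvTok_mem _ _ _ hx).1) []]
    -- B's scan is the same filter over the same tokens
    rw [pvScan_eq, pvMapHead_nil_append, List.nil_append]
    have hB : ((pvSp pvP cell_value.toList).map PySem.Chars.strip).filter pvKeep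
        = (pvTok pvP cell_value.toList).filter pvKeep := by
      rw [pvTok, pvFilterKeep]
    rw [hB, List.nil_append]
    have hpq : ∀ c : Char,
        (((((c == '\n') || c == '\r') || c == '|') || c == ';') || c == ',') = pvP c := by
      intro c
      simp [pvP, Bool.or_assoc]
    rw [pvTok_congr _ pvP hpq]
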